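-- pv_equiv track=rewrite | github.com/Einfeld686/MarsDiskSimulation | scripts/runsets/windows/preflight_checks.py | _join_caret_lines
-- ===== SOURCE A (Python) =====
-- def _join_caret_lines(lines: list[str]) -> list[tuple[int, str]]:
--     logical_lines: list[tuple[int, str]] = []
--     buffer: list[str] = []
--     start_line: int | None = None
--     for line_no, line in enumerate(lines, 1):
--         if start_line is None:
--             start_line = line_no
--         stripped = line.rstrip("\r\n")
--         trimmed = stripped.rstrip()
--         if trimmed.endswith("^"):
--             buffer.append(trimmed[:-1])
--             continue
--         buffer.append(stripped)
--         logical_lines.append((start_line, "".join(buffer)))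
--         buffer = []
--         start_line = None
--     if buffer:
--         logical_lines.append((start_line or 1, "".join(buffer)))
--     return logical_lines
-- ===== SOURCE B (Python) =====
-- def _join_caret_lines(lines: list[str]) -> list[tuple[int, str]]:
--     logical_lines: list[tuple[int, str]] = []
--     i = 0
--     n = len(lines)
--     while i < n:
--         start = i + 1
--         parts: list[str] = []
--         while i < n:
--             stripped = lines[i].rstrip("\r\n")
--             trimmed = stripped.rstrip()
--             i += 1
--             if trimmed.endswith("^"):
--                 parts.append(trimmed[:-1])
--             else:
--                 parts.append(stripped)
--                 break
--         logical_lines.append((start, "".join(parts)))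
--     return logical_lines
-- ===== Notes on version B (the rewrite author's own statement) =====
-- stated objective: simpler
-- what changed: Replaces the flat state machine (buffer list, Optional start_line sentinel, trailing flush block) with a nested-loop parser: an outer loop starting each logical line and an inner loop that consumes a caret-continued run and breaks on its terminator, so the None sentinel and the post-loop 'if buffer' flush disappear.
import Mathlib
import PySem

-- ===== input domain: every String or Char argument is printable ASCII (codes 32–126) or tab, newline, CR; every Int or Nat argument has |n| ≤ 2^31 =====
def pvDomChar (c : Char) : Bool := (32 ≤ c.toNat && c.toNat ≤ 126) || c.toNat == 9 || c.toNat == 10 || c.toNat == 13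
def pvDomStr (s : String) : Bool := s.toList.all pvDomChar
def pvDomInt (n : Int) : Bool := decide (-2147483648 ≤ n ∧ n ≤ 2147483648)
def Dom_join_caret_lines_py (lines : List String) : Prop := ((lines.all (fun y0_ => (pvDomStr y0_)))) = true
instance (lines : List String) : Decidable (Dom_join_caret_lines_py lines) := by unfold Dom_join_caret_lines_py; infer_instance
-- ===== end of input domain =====

-- B replaces A's flat state machine (buffer + Optional start_line sentinel + trailing flush)
-- with a nested outer/inner loop parser; same cost, simpler control flow.

-- shared primitive port of Python's s.rstrip("\r\n") (drop trailing '\r'/'\n' characters; exact)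
def rstripCRLF (s : String) : String :=
  String.ofList ((s.toList.reverse.dropWhile (fun c => c == '\r' || c == '\n')).reverse)

-- ===== PORT A =====
-- the for-loop of A as structural recursion over the same state
-- (lineNo, buffer, start_line, logical_lines); branches in source order
def aLoop : List String → Int → List String → Option Int → List (Int × String) → List (Int × String)
  | [], _, buffer, start, acc =>
      -- trailing `if buffer: logical_lines.append((start_line or 1, "".join(buffer)))`
      if buffer ≠ [] then
        acc ++ [((match start with
                  | some n => if n = 0 then 1 else n
                  | none => 1), PySem.Str.join "" buffer)]
      else acc
  | line :: rest, lineNo, buffer, start, acc =>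
      let start := match start with
                   | none => some lineNo
                   | some n => some n
      let stripped := rstripCRLF line
      let trimmed := PySem.Str.rstrip stripped
      if PySem.Str.endswith trimmed "^" then
        aLoop rest (lineNo + 1) (buffer ++ [PySem.Str.slice trimmed none (some (-1))]) start acc
      else
        aLoop rest (lineNo + 1) [] none (acc ++ [(start.getD 1, PySem.Str.join "" (buffer ++ [stripped]))])

def join_caret_lines_py (lines : List String) : List (Int × String) :=
  aLoop lines 1 [] none []

-- ===== PORT B =====
-- inner while: consume one caret-continued run; returns (parts, remaining lines)
def bInner : List String → List String × List String
  | [] => ([], [])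
  | line :: rest =>
      let stripped := rstripCRLF line
      let trimmed := PySem.Str.rstrip stripped
      if PySem.Str.endswith trimmed "^" then
        let r := bInner rest
        (PySem.Str.slice trimmed none (some (-1)) :: r.1, r.2)
      else
        ([stripped], rest)

theorem bInner_rest_le : ∀ (l : List String), (bInner l).2.length ≤ l.length := by
  intro l
  induction l with
  | nil => simp [bInner]
  | cons x xs ih =>
      simp only [bInner]
      split
      · simpa using Nat.le_succ_of_le ih
      · simp

theorem bInner_cons_lt (x : String) (xs : List String) :
    (bInner (x :: xs)).2.length < (x :: xs).length := by
  simp only [bInner]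
  split
  · exact Nat.lt_succ_of_le (by simpa using bInner_rest_le xs)
  · simp

-- outer while: pos = number of lines consumed so far; start = pos + 1
def bOuter : List String → Int → List (Int × String)
  | [], _ => []
  | line :: rest, pos =>
      let r := bInner (line :: rest)
      (pos + 1, PySem.Str.join "" r.1) ::
        bOuter r.2 (pos + (((line :: rest).length : Int) - (r.2.length : Int)))
  termination_by l _ => l.length
  decreasing_by
    exact bInner_cons_lt line rest

def join_caret_lines_py_alt (lines : List String) : List (Int × String) :=
  bOuter lines 0

-- ===== PRECONDITION & SPEC =====
def Spec_join_caret_lines_py (lines : List String) (out : List (Int × String)) : Prop := out = join_caret_lines_py_alt lines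
instance (lines : List String) (out : List (Int × String)) : Decidable (Spec_join_caret_lines_py lines out) := by unfold Spec_join_caret_lines_py; infer_instance

-- ===== CLAIM (what is proved, stated in full; the proofs are below) =====
def Claim_equal_join_caret_lines_py : Prop := ∀ (lines : List String), Dom_join_caret_lines_py lines → Spec_join_caret_lines_py lines (join_caret_lines_py lines)

-- ===== LEMMAS AND PROOFS =====

-- A's loop with nonempty pending state runs through one caret group exactly as bInner does
theorem aLoop_inner (l : List String) : ∀ (buffer : List String) (s pos : Int)
    (acc : List (Int × String)), s ≠ 0 → (buffer ≠ [] ∨ l ≠ []) →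
    aLoop l pos buffer (some s) acc =
      aLoop (bInner l).2 (pos + ((l.length : Int) - ((bInner l).2.length : Int))) [] none
        (acc ++ [(s, PySem.Str.join "" (buffer ++ (bInner l).1))]) := by
  induction l with
  | nil =>
      intro buffer s pos acc hs hne
      rcases hne with hb | hl
      · simp only [bInner, aLoop, if_pos hb]
        have : (if s = 0 then 1 else s) = s := if_neg hs
        simp [this]
      · exact absurd rfl hl
  | cons x xs ih =>
      intro buffer s pos acc hs _
      simp only [aLoop, bInner]
      split
      · -- caret continuation
        rw [ih (buffer ++ [PySem.Str.slice (PySem.Str.rstrip (rstripCRLF x)) none (some (-1))])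
              s (pos + 1) acc hs (Or.inl (by simp))]
        have hlen : pos + 1 + ((xs.length : Int) - ((bInner xs).2.length : Int)) =
            pos + (((x :: xs).length : Int) - ((bInner xs).2.length : Int)) := by
          simp; ring
        rw [hlen]
        simp
      · -- terminator line
        simp

-- an untouched (start = none) head behaves like start = some lineNo
theorem aLoop_start_none (x : String) (xs : List String) (pos : Int) (buffer : List String)
    (acc : List (Int × String)) :
    aLoop (x :: xs) pos buffer none acc = aLoop (x :: xs) pos buffer (some pos) acc := by
  simp only [aLoop]

-- main correspondence between A's state machine and B's nested loops
theorem aLoop_eq_bOuter (n : Nat) : ∀ (l : List String), l.length ≤ n → ∀ (pos : Int),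
    0 ≤ pos → ∀ (acc : List (Int × String)),
    aLoop l (pos + 1) [] none acc = acc ++ bOuter l pos := by
  induction n with
  | zero =>
      intro l hl pos _ acc
      interval_cases h : l.length
      · rw [List.length_eq_zero_iff.mp h]; simp [aLoop, bOuter]
  | succ n ih =>
      intro l hl pos hpos acc
      match l with
      | [] => simp [aLoop, bOuter]
      | x :: xs =>
          rw [aLoop_start_none, aLoop_inner (x :: xs) [] (pos + 1) (pos + 1) acc
                (by omega) (Or.inr (by simp))]
          have hrest := bInner_rest_le xs
          have hxlen : (bInner (x :: xs)).2.length ≤ xs.length := by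
            simp only [bInner]
            split
            · simpa using hrest
            · simp
          have harith : pos + 1 + (((x :: xs).length : Int) - ((bInner (x :: xs)).2.length : Int)) =
              (pos + (((x :: xs).length : Int) - ((bInner (x :: xs)).2.length : Int))) + 1 := by ring
          rw [harith, ih (bInner (x :: xs)).2 (by simp at hl; omega)
                (pos + (((x :: xs).length : Int) - ((bInner (x :: xs)).2.length : Int)))
                (by have : ((bInner (x :: xs)).2.length : Int) ≤ ((x :: xs).length : Int) := by
                      exact_mod_cast Nat.le_trans hxlen (by simp)
                    omega)]
          conv_rhs => rw [bOuter]
          simp only [List.nil_append, List.append_assoc, List.cons_append]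

-- ===== VERDICT (by name: the statement is the Claim_ definition above) =====
theorem join_caret_lines_py_spec : Claim_equal_join_caret_lines_py := by
  intro lines _
  unfold Spec_join_caret_lines_py join_caret_lines_py join_caret_lines_py_alt
  have h := aLoop_eq_bOuter lines.length lines le_rfl 0 le_rfl []
  simpa using h
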